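-- pv_equiv track=rewrite | github.com/Ninja1232123/Matrix-Mechanic | DevMaster Debugger/speed-guardian/demo_slow.py | slow_filter
-- ===== SOURCE A (Python) =====
-- def slow_filter(numbers):
--     """Multiple loops for filtering - can be combined"""
--     # First loop: filter evens
--     evens = []
--     for n in numbers:
--         if n % 2 == 0:
--             evens.append(n)
--
--     # Second loop: filter > 10
--     large = []
--     for n in evens:
--         if n > 10:
--             large.append(n)
--
--     # Third loop: square them
--     squared = []
--     for n in large:
--         squared.append(n * n)
--
--     return squared
-- ===== SOURCE B (Python) =====
-- def slow_filter(numbers):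
--     """One fused pass: combined guard, square immediately."""
--     squared = []
--     for n in numbers:
--         if n % 2 == 0 and n > 10:
--             squared.append(n * n)
--     return squared
-- ===== Notes on version B (the rewrite author's own statement) =====
-- stated objective: simpler
-- what changed: Fuses A's three sequential passes (filter even, filter >10, square) into a single traversal with one combined guard, building no intermediate lists.
import Mathlib
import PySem

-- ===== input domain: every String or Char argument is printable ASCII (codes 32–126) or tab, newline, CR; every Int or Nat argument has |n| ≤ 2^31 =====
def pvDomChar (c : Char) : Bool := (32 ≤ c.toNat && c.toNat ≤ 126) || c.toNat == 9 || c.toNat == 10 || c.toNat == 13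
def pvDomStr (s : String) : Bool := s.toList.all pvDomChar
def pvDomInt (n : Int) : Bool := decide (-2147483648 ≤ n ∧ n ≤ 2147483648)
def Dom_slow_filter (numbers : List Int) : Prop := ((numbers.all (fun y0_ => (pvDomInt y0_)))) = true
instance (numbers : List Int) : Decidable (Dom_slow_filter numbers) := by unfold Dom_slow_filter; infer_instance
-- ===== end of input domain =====

-- B fuses A's three passes (filter even, filter >10, square) into one traversal with a combined guard.


-- ===== PORT A =====
def slow_filter (numbers : List Int) : List Int :=
  let evens := numbers.foldl (fun acc n => if PySem.Int.mod n 2 = 0 then acc ++ [n] else acc) []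
  let large := evens.foldl (fun acc n => if n > 10 then acc ++ [n] else acc) []
  let squared := large.foldl (fun acc n => acc ++ [n * n]) []
  squared

-- ===== PORT B =====
def slow_filter_alt (numbers : List Int) : List Int :=
  numbers.foldl (fun acc n => if PySem.Int.mod n 2 = 0 ∧ n > 10 then acc ++ [n * n] else acc) []

-- ===== PRECONDITION & SPEC =====
def Spec_slow_filter (numbers : List Int) (out : List Int) : Prop := out = slow_filter_alt numbers
instance (numbers : List Int) (out : List Int) : Decidable (Spec_slow_filter numbers out) := by unfold Spec_slow_filter; infer_instance

-- ===== CLAIM (what is proved, stated in full; the proofs are below) =====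
def Claim_equal_slow_filter : Prop := ∀ (numbers : List Int), Dom_slow_filter numbers → Spec_slow_filter numbers (slow_filter numbers)

-- ===== LEMMAS AND PROOFS =====

-- ===== VERDICT (by name: the statement is the Claim_ definition above) =====
lemma fused_loop (l : List Int) (acc : List Int) :
    l.foldl (fun acc n => if PySem.Int.mod n 2 = 0 ∧ n > 10 then acc ++ [n * n] else acc) acc
      = acc ++ (l.filter (fun n => decide (PySem.Int.mod n 2 = 0) && decide (n > 10))).map (fun n => n * n) := by
  induction l generalizing acc with
  | nil => simp
  | cons x xs ih =>
    simp only [List.foldl_cons, List.filter_cons]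
    by_cases h : PySem.Int.mod x 2 = 0 ∧ x > 10
    · rw [if_pos h, ih]
      have : (decide (PySem.Int.mod x 2 = 0) && decide (x > 10)) = true := by
        simp only [decide_eq_true h.1, decide_eq_true h.2, Bool.and_self]
      rw [this]
      simp
    · rw [if_neg h, ih]
      have : (decide (PySem.Int.mod x 2 = 0) && decide (x > 10)) = false := by
        rcases Decidable.not_and_iff_not_or_not.mp h with h1 | h2
        · simp only [decide_eq_false h1, Bool.false_and]
        · simp only [decide_eq_false h2, Bool.and_false]
      rw [this]
      simp

theorem slow_filter_spec : Claim_equal_slow_filter := by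
  intro numbers _
  unfold Spec_slow_filter slow_filter slow_filter_alt
  simp only [PySem.List.foldl_append_ite_eq_filter, PySem.List.foldl_append_singleton_eq_map,
    fused_loop, List.nil_append, List.filter_filter]
  apply congrArg
  apply List.filter_congr
  intro x _
  exact Bool.and_comm _ _
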